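-- pv_equiv track=rewrite | github.com/LorewalkerAlex/leetcode-practice | 2021-Feb/.ipynb_checkpoints/978-LongestTurbulentSubarray-checkpoint.py | maxTurbulenceSize
-- ===== SOURCE A (Python) =====
-- from typing import List
--
-- def maxTurbulenceSize(arr: List[int]) -> int:
--     i = max_len = flag = 0
--     for j in range(len(arr)):
--         if j == i:
--             max_len = max(max_len, 1)
--         elif j - i == 1:
--             if arr[i] == arr[j]:
--                 i = j
--             else:
--                 if arr[j] < arr[i]:
--                     flag = 1
--                 max_len = max(max_len, 2)
--         else:
--             if flag:
--                 if arr[j-1] < arr[j]: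
--                     flag = 0
--                     max_len = max(max_len, j - i + 1)
--                 elif arr[j-1] == arr[j]:
--                     flag = 0
--                     i = j
--                 else:
--                     flag = 1
--                     i = j - 1
--                     max_len = max(max_len, 2)
--             else:
--                 if arr[j-1] > arr[j]:
--                     flag = 1
--                     max_len = max(max_len, j - i + 1)
--                 elif arr[j-1] == arr[j]:
--                     i = j
--                 else:
--                     i = j - 1
--                     max_len = max(max_len , 2)
--     return max_len
-- ===== SOURCE B (Python) =====
-- def maxTurbulenceSize(arr):
--     if not arr:
--         return 0
--     inc = dec = res = 1
--     for k in range(1, len(arr)):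
--         if arr[k] > arr[k - 1]:
--             inc = dec + 1
--             dec = 1
--         elif arr[k] < arr[k - 1]:
--             dec = inc + 1
--             inc = 1
--         else:
--             inc = dec = 1
--         res = max(res, inc, dec)
--     return res
-- ===== Notes on version B (the rewrite author's own statement) =====
-- stated objective: simpler
-- what changed: Replaces the window-start index i plus direction flag state machine (9 branches) with the standard two run-length counters inc/dec ending at the current element.
import Mathlib
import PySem

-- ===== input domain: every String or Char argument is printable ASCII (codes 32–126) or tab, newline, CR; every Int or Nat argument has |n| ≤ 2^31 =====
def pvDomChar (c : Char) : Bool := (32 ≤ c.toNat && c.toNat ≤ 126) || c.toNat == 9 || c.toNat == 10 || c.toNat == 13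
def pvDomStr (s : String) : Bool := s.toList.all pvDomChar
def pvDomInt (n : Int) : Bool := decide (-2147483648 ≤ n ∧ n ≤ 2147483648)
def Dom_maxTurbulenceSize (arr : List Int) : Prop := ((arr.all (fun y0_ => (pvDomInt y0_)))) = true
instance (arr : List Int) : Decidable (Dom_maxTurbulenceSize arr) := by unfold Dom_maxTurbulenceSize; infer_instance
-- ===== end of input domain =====

-- B replaces A's window-start-plus-direction-flag state machine by the standard
-- two run-length counters (inc/dec) DP; same O(n) cost, simpler.


-- ===== PORT A =====
-- A's for-loop over j in range(len(arr)) as tail recursion on the index j with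
-- state (i, max_len, flag).  Every index access in A is in range (j < len, i ≤ j,
-- 1 ≤ j in the branches using j-1), so arr[t] is ported as pyGetD arr t 0 (the
-- default is unreachable).
def loopA (arr : List Int) : Nat → Nat → Int → Int → Int → Int
  | 0, _, _, max_len, _ => max_len
  | fuel+1, j, i, max_len, flag =>
    if j < arr.length then
      if (j : Int) = i then
        loopA arr fuel (j+1) i (max max_len 1) flag
      else if (j : Int) - i = 1 then
        if PySem.List.pyGetD arr i 0 = PySem.List.pyGetD arr (j : Int) 0 then
          loopA arr fuel (j+1) (j : Int) max_len flag
        else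
          if PySem.List.pyGetD arr (j : Int) 0 < PySem.List.pyGetD arr i 0 then
            loopA arr fuel (j+1) i (max max_len 2) 1
          else
            loopA arr fuel (j+1) i (max max_len 2) flag
      else
        if flag ≠ 0 then
          if PySem.List.pyGetD arr ((j : Int) - 1) 0 < PySem.List.pyGetD arr (j : Int) 0 then
            loopA arr fuel (j+1) i (max max_len ((j : Int) - i + 1)) 0
          else if PySem.List.pyGetD arr ((j : Int) - 1) 0 = PySem.List.pyGetD arr (j : Int) 0 then
            loopA arr fuel (j+1) (j : Int) max_len 0
          else
            loopA arr fuel (j+1) ((j : Int) - 1) (max max_len 2) 1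
        else
          if PySem.List.pyGetD arr ((j : Int) - 1) 0 > PySem.List.pyGetD arr (j : Int) 0 then
            loopA arr fuel (j+1) i (max max_len ((j : Int) - i + 1)) 1
          else if PySem.List.pyGetD arr ((j : Int) - 1) 0 = PySem.List.pyGetD arr (j : Int) 0 then
            loopA arr fuel (j+1) (j : Int) max_len flag
          else
            loopA arr fuel (j+1) ((j : Int) - 1) (max max_len 2) flag
    else max_len

def maxTurbulenceSize (arr : List Int) : Int := loopA arr arr.length 0 0 0 0

-- ===== PORT B =====
-- B's for-loop over k in range(1, len(arr)) as tail recursion on k with state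
-- (inc, dec, res); arr[k], arr[k-1] are always in range, ported via pyGetD.
def loopB (arr : List Int) : Nat → Nat → Int → Int → Int → Int
  | 0, _, _, _, res => res
  | fuel+1, k, inc, dec, res =>
    if k < arr.length then
      if PySem.List.pyGetD arr (k : Int) 0 > PySem.List.pyGetD arr ((k : Int) - 1) 0 then
        loopB arr fuel (k+1) (dec + 1) 1 (max (max res (dec + 1)) 1)
      else if PySem.List.pyGetD arr (k : Int) 0 < PySem.List.pyGetD arr ((k : Int) - 1) 0 then
        loopB arr fuel (k+1) 1 (inc + 1) (max (max res 1) (inc + 1))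
      else
        loopB arr fuel (k+1) 1 1 (max (max res 1) 1)
    else res

def maxTurbulenceSize_alt (arr : List Int) : Int :=
  if arr = [] then 0 else loopB arr (arr.length - 1) 1 1 1 1

-- ===== PRECONDITION & SPEC =====
def Spec_maxTurbulenceSize (arr : List Int) (out : Int) : Prop := out = maxTurbulenceSize_alt arr
instance (arr : List Int) (out : Int) : Decidable (Spec_maxTurbulenceSize arr out) := by unfold Spec_maxTurbulenceSize; infer_instance

-- ===== CLAIM (what is proved, stated in full; the proofs are below) =====
def Claim_equal_maxTurbulenceSize : Prop := ∀ (arr : List Int), Dom_maxTurbulenceSize arr → Spec_maxTurbulenceSize arr (maxTurbulenceSize arr)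

-- ===== LEMMAS AND PROOFS =====

-- The invariant relating A's state (i, max_len, flag) to B's state (inc, dec, res)
-- when both loops are about to process index j (1 ≤ j ≤ len arr).
def StateInv (arr : List Int) (j : Nat) (i max_len flag inc dec res : Int) : Prop :=
  0 ≤ i ∧ i ≤ (j : Int) - 1 ∧ max_len = res ∧ 1 ≤ max_len ∧
  ((flag = 1 ∧ i ≤ (j : Int) - 2 ∧
      PySem.List.pyGetD arr ((j : Int) - 2) 0 > PySem.List.pyGetD arr ((j : Int) - 1) 0 ∧
      inc = 1 ∧ dec = (j : Int) - i) ∨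
   (flag = 0 ∧
      ((i = (j : Int) - 1 ∧ inc = 1 ∧ dec = 1) ∨
       (i ≤ (j : Int) - 2 ∧
          PySem.List.pyGetD arr ((j : Int) - 2) 0 < PySem.List.pyGetD arr ((j : Int) - 1) 0 ∧
          inc = (j : Int) - i ∧ dec = 1))))

lemma loop_eq (arr : List Int) : ∀ (fuel j : Nat) (i max_len flag inc dec res : Int),
    arr.length - j = fuel → 1 ≤ j →
    StateInv arr j i max_len flag inc dec res →
    loopA arr fuel j i max_len flag = loopB arr fuel j inc dec res := by
  intro fuel
  induction fuel with
  | zero =>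
    intro j i ml flag inc dec res hf hj hinv
    rw [loopA, loopB]
    exact hinv.2.2.1
  | succ fuel ih =>
    intro j i ml flag inc dec res hf hj hinv
    have hlt : j < arr.length := by omega
    obtain ⟨hi0, hij, hml, hml1, hcase⟩ := hinv
    have ix2 : ((((j+1) : Nat)) : Int) - 2 = (j : Int) - 1 := by push_cast; ring
    have ix1 : ((((j+1) : Nat)) : Int) - 1 = (j : Int) := by push_cast; ring
    rw [loopA, loopB]
    simp only [if_pos hlt]
    rw [if_neg (by omega : ¬ ((j : Int) = i))]
    by_cases h1 : (j : Int) - i = 1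
    · -- window of length 1: i = j - 1; the flag = 1 disjunct is impossible here
      have hieq : i = (j : Int) - 1 := by omega
      rcases hcase with ⟨_, hle, _⟩ | ⟨hfl0, hsub⟩
      · omega
      rcases hsub with ⟨_, hinc, hdec⟩ | ⟨hle, _⟩
      swap
      · omega
      rw [if_pos h1, hieq]
      by_cases heq : PySem.List.pyGetD arr ((j : Int) - 1) 0 = PySem.List.pyGetD arr (j : Int) 0
      · rw [if_pos heq, if_neg (by omega : ¬ PySem.List.pyGetD arr (j : Int) 0 > PySem.List.pyGetD arr ((j : Int) - 1) 0),
            if_neg (by omega : ¬ PySem.List.pyGetD arr (j : Int) 0 < PySem.List.pyGetD arr ((j : Int) - 1) 0)]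
        apply ih (j+1) <;> try omega
        exact ⟨by omega, by push_cast; omega, by omega, by omega,
          Or.inr ⟨hfl0, Or.inl ⟨by rw [ix1], rfl, rfl⟩⟩⟩
      · rw [if_neg heq]
        by_cases hlt2 : PySem.List.pyGetD arr (j : Int) 0 < PySem.List.pyGetD arr ((j : Int) - 1) 0
        · rw [if_pos hlt2, if_neg (by omega : ¬ PySem.List.pyGetD arr (j : Int) 0 > PySem.List.pyGetD arr ((j : Int) - 1) 0),
              if_pos hlt2]
          apply ih (j+1) <;> try omega
          refine ⟨by omega, by push_cast; omega, by omega, by omega,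
            Or.inl ⟨rfl, by push_cast; omega, ?_, rfl, by push_cast; omega⟩⟩
          rw [ix2, ix1]; omega
        · rw [if_neg hlt2, if_pos (by omega : PySem.List.pyGetD arr (j : Int) 0 > PySem.List.pyGetD arr ((j : Int) - 1) 0), hfl0]
          apply ih (j+1) <;> try omega
          refine ⟨by omega, by push_cast; omega, by omega, by omega,
            Or.inr ⟨rfl, Or.inr ⟨by push_cast; omega, ?_, by push_cast; omega, rfl⟩⟩⟩
          rw [ix2, ix1]; omega
    · -- window length ≥ 2: i ≤ j - 2
      rw [if_neg h1]
      have hile : i ≤ (j : Int) - 2 := by omega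
      rcases hcase with ⟨hfl1, _, hdir, hinc, hdec⟩ | ⟨hfl0, hsub⟩
      · -- flag = 1: previous comparison was a decrease
        rw [if_pos (by rw [hfl1]; norm_num : flag ≠ 0)]
        by_cases hup : PySem.List.pyGetD arr ((j : Int) - 1) 0 < PySem.List.pyGetD arr (j : Int) 0
        · rw [if_pos hup, if_pos (by omega : PySem.List.pyGetD arr (j : Int) 0 > PySem.List.pyGetD arr ((j : Int) - 1) 0)]
          apply ih (j+1) <;> try omega
          refine ⟨by omega, by push_cast; omega, by omega, by omega,
            Or.inr ⟨rfl, Or.inr ⟨by push_cast; omega, ?_, by push_cast; omega, rfl⟩⟩⟩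
          rw [ix2, ix1]; omega
        · rw [if_neg hup, if_neg (by omega : ¬ PySem.List.pyGetD arr (j : Int) 0 > PySem.List.pyGetD arr ((j : Int) - 1) 0)]
          by_cases heq : PySem.List.pyGetD arr ((j : Int) - 1) 0 = PySem.List.pyGetD arr (j : Int) 0
          · rw [if_pos heq, if_neg (by omega : ¬ PySem.List.pyGetD arr (j : Int) 0 < PySem.List.pyGetD arr ((j : Int) - 1) 0)]
            apply ih (j+1) <;> try omega
            exact ⟨by omega, by push_cast; omega, by omega, by omega,
              Or.inr ⟨rfl, Or.inl ⟨by rw [ix1], rfl, rfl⟩⟩⟩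
          · rw [if_neg heq, if_pos (by omega : PySem.List.pyGetD arr (j : Int) 0 < PySem.List.pyGetD arr ((j : Int) - 1) 0)]
            apply ih (j+1) <;> try omega
            refine ⟨by omega, by push_cast; omega, by omega, by omega,
              Or.inl ⟨rfl, by push_cast; omega, ?_, rfl, by push_cast; omega⟩⟩
            rw [ix2, ix1]; omega
      · -- flag = 0: previous comparison was an increase (length-1 subcase impossible)
        rcases hsub with ⟨hieq, _⟩ | ⟨_, hdir, hinc, hdec⟩
        · omega
        rw [hfl0, if_neg (by norm_num : ¬ ((0 : Int) ≠ 0))]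
        by_cases hdown : PySem.List.pyGetD arr ((j : Int) - 1) 0 > PySem.List.pyGetD arr (j : Int) 0
        · rw [if_pos hdown, if_neg (by omega : ¬ PySem.List.pyGetD arr (j : Int) 0 > PySem.List.pyGetD arr ((j : Int) - 1) 0),
              if_pos (by omega : PySem.List.pyGetD arr (j : Int) 0 < PySem.List.pyGetD arr ((j : Int) - 1) 0)]
          apply ih (j+1) <;> try omega
          refine ⟨by omega, by push_cast; omega, by omega, by omega,
            Or.inl ⟨rfl, by push_cast; omega, ?_, rfl, by push_cast; omega⟩⟩
          rw [ix2, ix1]; omega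
        · rw [if_neg hdown]
          by_cases heq : PySem.List.pyGetD arr ((j : Int) - 1) 0 = PySem.List.pyGetD arr (j : Int) 0
          · rw [if_pos heq, if_neg (by omega : ¬ PySem.List.pyGetD arr (j : Int) 0 > PySem.List.pyGetD arr ((j : Int) - 1) 0),
                if_neg (by omega : ¬ PySem.List.pyGetD arr (j : Int) 0 < PySem.List.pyGetD arr ((j : Int) - 1) 0)]
            apply ih (j+1) <;> try omega
            exact ⟨by omega, by push_cast; omega, by omega, by omega,
              Or.inr ⟨rfl, Or.inl ⟨by rw [ix1], rfl, rfl⟩⟩⟩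
          · rw [if_neg heq, if_pos (by omega : PySem.List.pyGetD arr (j : Int) 0 > PySem.List.pyGetD arr ((j : Int) - 1) 0)]
            apply ih (j+1) <;> try omega
            refine ⟨by omega, by push_cast; omega, by omega, by omega,
              Or.inr ⟨rfl, Or.inr ⟨by push_cast; omega, ?_, by push_cast; omega, rfl⟩⟩⟩
            rw [ix2, ix1]; omega

-- ===== VERDICT (by name: the statement is the Claim_ definition above) =====
theorem maxTurbulenceSize_spec : Claim_equal_maxTurbulenceSize := by
  intro arr _
  unfold Spec_maxTurbulenceSize maxTurbulenceSize maxTurbulenceSize_alt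
  by_cases hnil : arr = []
  · subst hnil
    rw [show ([] : List Int).length = 0 from rfl, loopA]
    simp
  · rw [if_neg hnil]
    have hlen : 0 < arr.length := List.length_pos_iff.mpr hnil
    obtain ⟨m, hm⟩ : ∃ m, arr.length = m + 1 := ⟨arr.length - 1, by omega⟩
    rw [hm, loopA]
    rw [if_pos (by omega : 0 < arr.length), if_pos (by norm_num : ((0 : Nat) : Int) = 0)]
    rw [show m + 1 - 1 = m from rfl]
    exact loop_eq arr m 1 0 (max 0 1) 0 1 1 1 (by omega) (by omega)
      ⟨by omega, by omega, by omega, by omega, Or.inr ⟨rfl, Or.inl ⟨by norm_num, rfl, rfl⟩⟩⟩
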